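-- pv_equiv track=rewrite | github.com/rmorriscpux/daily-coding-challenges | 181-200/challenge_199.py | balanceParenthesesDel
-- ===== SOURCE A (Python) =====
-- def balanceParenthesesDel(parentheses: str):
--     # End case: empty string.
--     if not parentheses:
--         return ""
--
--     # Ignore all closing parentheses at the beginning of the string.
--     start = 0
--     while parentheses[start] == ')':
--         start += 1
--         if start == len(parentheses):
--             return ""
--
--     parentheses = parentheses[start:]
--     open_count = 0
--
--     # Traverse until wthere are balanced parentheses.
--     for i, p in enumerate(parentheses):
--         if p == '(':
--             open_count += 1
--         elif p == ')':
--             open_count -= 1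
--
--         if open_count == 0:
--             break
--
--     # When there are balanced parentheses, recur into the tail afterward. Otherwise, there are leading open parentheses equal to open_count to be truncated.
--     return parentheses[open_count:] if open_count > 0 else parentheses[:i+1] + balanceParenthesesDel(parentheses[i+1:])
-- ===== SOURCE B (Python) =====
-- def balanceParenthesesDel(parentheses: str):
--     out = []
--     bal = 0
--     last0 = 0
--     for c in parentheses:
--         if c == ')':
--             if bal == 0:
--                 continue
--             bal -= 1
--         elif c == '(':
--             bal += 1
--         out.append(c)
--         if bal == 0:
--             last0 = len(out)
--     if bal > 0:
--         out = out[:last0] + out[last0 + bal:]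
--     return ''.join(out)
-- ===== Notes on version B (the rewrite author's own statement) =====
-- stated objective: faster
-- what changed: Replaced A's recursive scheme (skip leading closers, re-scan for the shortest balance-zero prefix, slice and recur on the tail) by one linear pass that drops unmatched closers with a counter and remembers the last balance-zero position, then excises the trailing unmatched-opener run with a single splice.
import Mathlib
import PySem

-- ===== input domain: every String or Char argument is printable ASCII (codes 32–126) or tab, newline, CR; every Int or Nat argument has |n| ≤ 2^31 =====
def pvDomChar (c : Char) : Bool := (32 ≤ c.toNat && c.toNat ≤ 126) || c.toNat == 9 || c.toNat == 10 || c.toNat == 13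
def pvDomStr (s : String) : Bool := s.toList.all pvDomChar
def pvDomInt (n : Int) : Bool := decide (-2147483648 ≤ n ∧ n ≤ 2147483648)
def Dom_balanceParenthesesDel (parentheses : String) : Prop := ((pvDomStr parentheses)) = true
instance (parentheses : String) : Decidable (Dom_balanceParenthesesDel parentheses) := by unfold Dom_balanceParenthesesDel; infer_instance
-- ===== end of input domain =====

-- B replaces A's recursive rescan-and-slice scheme with one linear counter pass plus a single
-- final splice (objective: faster).

-- ===== PORT A =====
-- the 'while parentheses[start] == ')'' loop: returns the remainder after the leading ')' run;
-- [] is the 'start == len(parentheses): return ""' exit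
def pvSkipA : List Char → List Char
  | [] => []
  | c :: rest => if c = ')' then pvSkipA rest else c :: rest

-- cited by pvCoreA's termination proof
theorem pvSkipA_length (s : List Char) : (pvSkipA s).length ≤ s.length := by
  induction s with
  | nil => simp [pvSkipA]
  | cons c rest ih =>
    simp only [pvSkipA]
    split
    · exact le_trans ih (by simp)
    · simp

-- the 'for i, p in enumerate(parentheses)' loop with its break: returns (i, open_count) as left
-- by the Python loop (on natural exit i is the last index, hence the i - 1 in the [] case)
def pvScanA : List Char → Nat → Int → Nat × Int
  | [], i, oc => (i - 1, oc)
  | c :: rest, i, oc =>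
    let oc' := if c = '(' then oc + 1 else if c = ')' then oc - 1 else oc
    if oc' = 0 then (i, 0) else pvScanA rest (i + 1) oc'

def pvCoreA (s : List Char) : List Char :=
  if s = [] then []
  else
    match hts : pvSkipA s with
    | [] => []
    | c :: r =>
      let i := (pvScanA (c :: r) 0 0).1
      let oc := (pvScanA (c :: r) 0 0).2
      if 0 < oc then PySem.List.slice (c :: r) (some oc) none
      else PySem.List.slice (c :: r) none (some ((i + 1 : Nat) : Int)) ++
           pvCoreA (PySem.List.slice (c :: r) (some ((i + 1 : Nat) : Int)) none)
termination_by s.length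
decreasing_by
  simp only [PySem.List.slice_from_natCast, List.length_drop, List.length_cons]
  have h1 : (pvSkipA s).length ≤ s.length := pvSkipA_length s
  rw [hts] at h1
  simp only [List.length_cons] at h1
  omega

def balanceParenthesesDel (parentheses : String) : String :=
  String.ofList (pvCoreA parentheses.toList)

-- ===== PORT B =====
-- the single 'for c in parentheses' pass of Source B: state (out, bal, last0)
def pvLoopB : List Char → List Char → Int → Nat → List Char × Int × Nat
  | [], out, bal, last0 => (out, bal, last0)
  | c :: rest, out, bal, last0 =>
    if c = ')' then
      if bal = 0 then pvLoopB rest out bal last0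
      else pvLoopB rest (out ++ [c]) (bal - 1)
             (if bal - 1 = 0 then (out ++ [c]).length else last0)
    else
      pvLoopB rest (out ++ [c]) (if c = '(' then bal + 1 else bal)
        (if (if c = '(' then bal + 1 else bal) = 0 then (out ++ [c]).length else last0)

def balanceParenthesesDel_alt (parentheses : String) : String :=
  match pvLoopB parentheses.toList [] 0 0 with
  | (out, bal, last0) =>
    -- out[:last0] + out[last0 + bal:] — both slice bounds are nonnegative, so take/drop is exact
    String.ofList (if 0 < bal then out.take last0 ++ out.drop (last0 + bal.toNat) else out)

-- ===== PRECONDITION & SPEC =====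
def Spec_balanceParenthesesDel (parentheses : String) (out : String) : Prop := out = balanceParenthesesDel_alt parentheses
instance (parentheses : String) (out : String) : Decidable (Spec_balanceParenthesesDel parentheses out) := by unfold Spec_balanceParenthesesDel; infer_instance

-- ===== CLAIM (what is proved, stated in full; the proofs are below) =====
def Claim_equal_balanceParenthesesDel : Prop := ∀ (parentheses : String), Dom_balanceParenthesesDel parentheses → Spec_balanceParenthesesDel parentheses (balanceParenthesesDel parentheses)

-- ===== LEMMAS AND PROOFS =====

-- B's whole result as a function of the raw character list
def pvBFull (s : List Char) : List Char :=
  match pvLoopB s [] 0 0 with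
  | (out, bal, last0) =>
    if 0 < bal then out.take last0 ++ out.drop (last0 + bal.toNat) else out

theorem pvBFull_alt (s : String) :
    balanceParenthesesDel_alt s = String.ofList (pvBFull s.toList) := by
  unfold balanceParenthesesDel_alt pvBFull
  rcases pvLoopB s.toList [] 0 0 with ⟨o, b, l⟩
  rfl

-- with bal = 0, B's loop skips the leading ')' run exactly as A's while loop does
theorem pvLoopB_skip (s : List Char) : pvLoopB s [] 0 0 = pvLoopB (pvSkipA s) [] 0 0 := by
  induction s with
  | nil => rfl
  | cons c rest ih =>
    by_cases hc : c = ')'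
    · simp [pvLoopB, pvSkipA, hc, ih]
    · simp [pvSkipA, hc]

-- a committed prefix 'pre' of the output just rides along in B's loop state
theorem pvLoopB_prefix (xs : List Char) (pre : List Char) :
    ∀ (out : List Char) (bal : Int) (l : Nat),
    pvLoopB xs (pre ++ out) bal (pre.length + l) =
      (pre ++ (pvLoopB xs out bal l).1, (pvLoopB xs out bal l).2.1,
       pre.length + (pvLoopB xs out bal l).2.2) := by
  induction xs with
  | nil => intro out bal l; rfl
  | cons c rest ih =>
    intro out bal l
    by_cases hc : c = ')'
    · by_cases hb : bal = 0
      · simp [pvLoopB, hc, hb, ih]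
      · simp only [pvLoopB, hc, if_neg hb, List.append_assoc, if_true]
        by_cases hb1 : bal - 1 = 0
        · simp only [hb1, if_true, List.length_append,
            List.length_cons, List.length_nil, Nat.zero_add, ← Nat.add_assoc]
          rw [show pre.length + out.length + 1 = pre.length + (out.length + 1) by omega, ih]
        · simp only [hb1, ite_false]
          rw [ih]
    · simp only [pvLoopB, if_neg hc, List.append_assoc]
      by_cases hb1 : (if c = '(' then bal + 1 else bal) = 0
      · simp only [hb1, if_true, List.length_append,
          List.length_cons, List.length_nil, Nat.zero_add, ← Nat.add_assoc]
        rw [show pre.length + out.length + 1 = pre.length + (out.length + 1) by omega, ih]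
      · simp only [hb1, ite_false]
        rw [ih]

-- the splice commutes with a committed prefix
theorem pvSplice_prefix (pre o : List Char) (b : Int) (l : Nat) :
    (if 0 < b then (pre ++ o).take (pre.length + l) ++ (pre ++ o).drop (pre.length + l + b.toNat)
     else pre ++ o) =
    pre ++ (if 0 < b then o.take l ++ o.drop (l + b.toNat) else o) := by
  by_cases hb : 0 < b
  · simp [hb, List.take_length_add_append, Nat.add_assoc, List.drop_length_add_append]
  · simp [hb]

-- the one-character balance step shared by A's scan and B's loop
def pvStepVal (oc : Int) (c : Char) : Int :=
  if c = '(' then oc + 1 else if c = ')' then oc - 1 else oc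

theorem pvScanA_cons (c : Char) (rest : List Char) (i : Nat) (oc : Int) :
    pvScanA (c :: rest) i oc =
      if pvStepVal oc c = 0 then (i, 0) else pvScanA rest (i + 1) (pvStepVal oc c) := rfl

theorem pvLoopB_cons_step (c : Char) (rest out : List Char) (bal : Int) (l : Nat)
    (h : c = ')' → bal ≠ 0) :
    pvLoopB (c :: rest) out bal l =
      pvLoopB rest (out ++ [c]) (pvStepVal bal c)
        (if pvStepVal bal c = 0 then (out ++ [c]).length else l) := by
  by_cases hc : c = ')'
  · subst hc
    simp [pvLoopB, pvStepVal, h rfl]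
  · by_cases hc2 : c = '(' <;> simp [pvLoopB, pvStepVal, hc, hc2]

-- core scan correspondence: starting from a strictly positive balance, A's scan and B's loop
-- walk the same characters; (pvScanA t i oc).1 + 1 - i is the number of characters A consumes
theorem pvScan_main (t : List Char) : ∀ (i : Nat) (oc : Int) (out : List Char) (l : Nat),
    0 < oc →
    (((pvScanA t i oc).2 = 0 ∧
       1 ≤ (pvScanA t i oc).1 + 1 - i ∧ (pvScanA t i oc).1 + 1 - i ≤ t.length ∧ i ≤ (pvScanA t i oc).1 ∧
       pvLoopB t out oc l =
         pvLoopB (t.drop ((pvScanA t i oc).1 + 1 - i)) (out ++ t.take ((pvScanA t i oc).1 + 1 - i))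
           0 (out.length + ((pvScanA t i oc).1 + 1 - i)))
    ∨ (0 < (pvScanA t i oc).2 ∧ pvLoopB t out oc l = (out ++ t, (pvScanA t i oc).2, l))) := by
  induction t with
  | nil =>
    intro i oc out l hoc
    right
    refine ⟨hoc, ?_⟩
    simp [pvScanA, pvLoopB]
  | cons c rest ih =>
    intro i oc out l hoc
    have hlb : pvLoopB (c :: rest) out oc l =
        pvLoopB rest (out ++ [c]) (pvStepVal oc c)
          (if pvStepVal oc c = 0 then (out ++ [c]).length else l) :=
      pvLoopB_cons_step c rest out oc l (fun _ => by omega)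
    by_cases h0 : pvStepVal oc c = 0
    · left
      rw [pvScanA_cons, if_pos h0]
      refine ⟨rfl, by omega, by simp, le_refl i, ?_⟩
      have hn : i + 1 - i = 1 := by omega
      rw [hn, hlb, if_pos h0, h0]
      simp
    · have hpos : 0 < pvStepVal oc c := by
        unfold pvStepVal at h0 ⊢; split_ifs at h0 ⊢ <;> omega
      have hscan : pvScanA (c :: rest) i oc = pvScanA rest (i + 1) (pvStepVal oc c) := by
        rw [pvScanA_cons, if_neg h0]
      have hl : pvLoopB (c :: rest) out oc l =
          pvLoopB rest (out ++ [c]) (pvStepVal oc c) l := by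
        rw [hlb, if_neg h0]
      rcases ih (i + 1) (pvStepVal oc c) (out ++ [c]) l hpos with
        ⟨h2, hn1, hn2, hile, heq⟩ | ⟨h2, heq⟩
      · left
        rw [hscan, hl]
        refine ⟨h2, by omega, by simp only [List.length_cons]; omega, by omega, ?_⟩
        have hn : (pvScanA rest (i + 1) (pvStepVal oc c)).1 + 1 - i =
            ((pvScanA rest (i + 1) (pvStepVal oc c)).1 + 1 - (i + 1)) + 1 := by omega
        rw [hn, List.drop_succ_cons, List.take_succ_cons]
        simp only [List.append_assoc, List.singleton_append, List.length_append,
          List.length_cons, List.length_nil, Nat.zero_add] at heq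
        have harith : out.length +
            (((pvScanA rest (i + 1) (pvStepVal oc c)).1 + 1 - (i + 1)) + 1) =
            out.length + 1 + ((pvScanA rest (i + 1) (pvStepVal oc c)).1 + 1 - (i + 1)) := by omega
        rw [harith]
        exact heq
      · right
        rw [hscan]
        refine ⟨h2, ?_⟩
        rw [hl, heq]
        simp

-- the head of A's skip result is never ')'
theorem pvSkipA_head : ∀ (s : List Char) (c : Char) (r : List Char),
    pvSkipA s = c :: r → ¬ c = ')' := by
  intro s
  induction s with
  | nil => intro c r h; simp [pvSkipA] at h
  | cons d rest ih =>
    intro c r h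
    by_cases hd : d = ')'
    · rw [pvSkipA, if_pos hd] at h
      exact ih c r h
    · rw [pvSkipA, if_neg hd] at h
      obtain ⟨h1, h2⟩ := List.cons.inj h
      exact h1 ▸ hd

-- committing a balanced prefix p commutes with B's whole computation
theorem pvBFull_shift (s rest' p : List Char)
    (h : pvLoopB s [] 0 0 = pvLoopB rest' p 0 p.length) :
    pvBFull s = p ++ pvBFull rest' := by
  unfold pvBFull
  rw [h]
  have hp := pvLoopB_prefix rest' p [] 0 0
  simp only [List.append_nil, Nat.add_zero] at hp
  rw [hp]
  rcases hE : pvLoopB rest' [] 0 0 with ⟨o, b, l⟩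
  exact pvSplice_prefix p o b l

theorem pvCore_eq_aux : ∀ (n : Nat) (s : List Char), s.length ≤ n → pvCoreA s = pvBFull s := by
  intro n
  induction n with
  | zero =>
    intro s hs
    have hnil : s = [] := List.eq_nil_of_length_eq_zero (Nat.le_zero.mp hs)
    subst hnil
    rw [pvCoreA]
    rfl
  | succ n ih =>
    intro s hs
    by_cases hnil : s = []
    · subst hnil; rw [pvCoreA]; rfl
    rw [pvCoreA, if_neg hnil]
    split
    next heq =>
      unfold pvBFull
      rw [pvLoopB_skip, heq]
      rfl
    next c r heq =>
      have hc : ¬ c = ')' := pvSkipA_head s c r heq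
      have hlen : r.length + 1 ≤ s.length := by
        have h1 := pvSkipA_length s
        rw [heq] at h1
        simpa using h1
      have hB0 : pvLoopB s [] 0 0 = pvLoopB (c :: r) [] 0 0 := by
        rw [pvLoopB_skip, heq]
      by_cases hcp : c = '('
      · subst hcp
        have hstep : pvStepVal 0 '(' = 1 := by decide
        have hscan0 : pvScanA ('(' :: r) 0 0 = pvScanA r 1 1 := by
          rw [pvScanA_cons, hstep, if_neg (by norm_num)]
        have hB1 : pvLoopB ('(' :: r) [] 0 0 = pvLoopB r ['('] 1 0 := by
          rw [pvLoopB_cons_step '(' r [] 0 0 (fun h => absurd h (by decide)), hstep,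
            if_neg (by norm_num)]
          rfl
        rcases pvScan_main r 1 1 ['('] 0 (by norm_num) with
          ⟨h2, hn1, hn2, hile, heqL⟩ | ⟨h2, heqR⟩
        · -- A's scan breaks at a balance-zero point
          simp only [Nat.add_sub_cancel] at h2 hn1 hn2 hile heqL
          simp only [hscan0, h2, lt_irrefl, if_false]
          rw [PySem.List.slice_to_natCast, PySem.List.slice_from_natCast]
          rw [List.take_succ_cons, List.drop_succ_cons]
          have hplen : ('(' :: r.take (pvScanA r 1 1).1).length = 1 + (pvScanA r 1 1).1 := by
            simp only [List.length_cons, List.length_take]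
            omega
          have hshift := pvBFull_shift s (r.drop (pvScanA r 1 1).1)
            ('(' :: r.take (pvScanA r 1 1).1)
            (by rw [hB0, hB1, heqL, hplen]
                simp)
          rw [hshift]
          have hih : pvCoreA (r.drop (pvScanA r 1 1).1) = pvBFull (r.drop (pvScanA r 1 1).1) := by
            apply ih
            simp only [List.length_drop]
            omega
          rw [hih]
        · -- A's scan runs off the end with positive balance
          simp only [hscan0]
          rw [if_pos h2, PySem.List.slice_from _ (le_of_lt h2)]
          unfold pvBFull
          rw [hB0, hB1, heqR]
          simp [h2]
      · have hstep : pvStepVal 0 c = 0 := by simp [pvStepVal, hcp, hc]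
        have hscan0 : pvScanA (c :: r) 0 0 = (0, 0) := by rw [pvScanA_cons, if_pos hstep]
        have hB1 : pvLoopB (c :: r) [] 0 0 = pvLoopB r [c] 0 1 := by
          rw [pvLoopB_cons_step c r [] 0 0 (fun h => absurd h hc), hstep, if_pos rfl]
          rfl
        simp only [hscan0, lt_irrefl, if_false]
        rw [PySem.List.slice_to_natCast, PySem.List.slice_from_natCast]
        simp only [Nat.zero_add, List.take_succ_cons, List.take_zero, List.drop_succ_cons,
          List.drop_zero]
        have hshift := pvBFull_shift s r [c]
          (by rw [hB0, hB1]
              rfl)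
        rw [hshift]
        have hih : pvCoreA r = pvBFull r := by
          apply ih
          omega
        rw [hih]

theorem pvCore_eq (s : List Char) : pvCoreA s = pvBFull s :=
  pvCore_eq_aux s.length s (le_refl _)

-- ===== VERDICT (by name: the statement is the Claim_ definition above) =====
theorem balanceParenthesesDel_spec : Claim_equal_balanceParenthesesDel := by
  intro s _
  unfold Spec_balanceParenthesesDel balanceParenthesesDel
  rw [pvBFull_alt, pvCore_eq]
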